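-- pv_equiv track=rewrite | github.com/Shunpoco/leetcode | number-of-ways-to-split-array/main.py | waysToSplitArray
-- ===== SOURCE A (Python) =====
-- from typing import List
--
-- def waysToSplitArray(nums: List[int]) -> int:
--     cums = []
--     t = 0
--     for num in nums:
--         t += num
--         cums.append(t)
--
--     result = 0
--
--     for i in range(len(nums)-1):
--         l, r = cums[i], cums[-1] - cums[i]
--
--         if l >= r:
--             result += 1
--
--     return result
-- ===== SOURCE B (Python) =====
-- from typing import List
--
-- def waysToSplitArray(nums: List[int]) -> int:
--     total = sum(nums)
--     right = 0
--     result = 0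
--     for num in reversed(nums[1:]):
--         right += num
--         if 2 * right <= total:
--             result += 1
--     return result
-- ===== Notes on version B (the rewrite author's own statement) =====
-- stated objective: alternative
-- what changed: Traverses the array back-to-front maintaining only the running SUFFIX sum (A builds a prefix-sum table and scans it front-to-back), and tests each split algebraically as 2*right <= total instead of comparing left against total-left; correctness rests on prefix+suffix = total at every split point.
import Mathlib
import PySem

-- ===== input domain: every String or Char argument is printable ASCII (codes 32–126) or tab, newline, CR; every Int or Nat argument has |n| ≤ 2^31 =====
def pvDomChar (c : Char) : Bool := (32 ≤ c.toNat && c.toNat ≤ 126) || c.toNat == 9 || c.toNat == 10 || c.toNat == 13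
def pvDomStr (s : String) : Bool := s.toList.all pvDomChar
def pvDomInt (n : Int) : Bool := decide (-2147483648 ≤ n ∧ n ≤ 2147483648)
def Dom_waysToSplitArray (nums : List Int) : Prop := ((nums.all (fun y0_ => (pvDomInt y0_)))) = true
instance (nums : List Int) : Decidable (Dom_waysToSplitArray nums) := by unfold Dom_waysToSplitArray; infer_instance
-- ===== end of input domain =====

-- B scans back-to-front over the running suffix sum, testing 2*right ≤ total, instead of
-- A's prefix-sum table scanned front-to-back (objective: alternative; O(1) extra space).

-- ===== PORT A =====
-- first loop: builds cums (prefix sums) and running t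
def waysToSplitArray (nums : List Int) : Int :=
  let st := nums.foldl (fun (st : List Int × Int) num =>
      let t := st.2 + num
      (st.1 ++ [t], t)) ([], 0)
  let cums := st.1
  -- second loop over range(len(nums)-1); cums[i] and cums[-1] are always in range
  -- there (i < len-1 forces cums nonempty), so .getD 0 never supplies the default
  (PySem.List.pyRange 0 ((nums.length : Int) - 1) 1).foldl (fun result i =>
      let l := (PySem.List.pyGet? cums i).getD 0
      let r := (PySem.List.pyGet? cums (-1)).getD 0 - l
      if l ≥ r then result + 1 else result) 0

-- ===== PORT B =====
def waysToSplitArray_alt (nums : List Int) : Int :=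
  let total := nums.sum
  let p := ((PySem.List.slice nums (some 1) none).reverse).foldl   -- reversed(nums[1:])
      (fun (st : Int × Int) num =>
        let right := st.1 + num
        (right, if 2 * right ≤ total then st.2 + 1 else st.2)) (0, 0)
  p.2

-- ===== PRECONDITION & SPEC =====
def Spec_waysToSplitArray (nums : List Int) (out : Int) : Prop := out = waysToSplitArray_alt nums
instance (nums : List Int) (out : Int) : Decidable (Spec_waysToSplitArray nums out) := by unfold Spec_waysToSplitArray; infer_instance

-- ===== CLAIM (what is proved, stated in full; the proofs are below) =====
def Claim_equal_waysToSplitArray : Prop := ∀ (nums : List Int), Dom_waysToSplitArray nums → Spec_waysToSplitArray nums (waysToSplitArray nums)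

-- ===== LEMMAS AND PROOFS =====

/-- Reference prefix-sum list: `psList t xs` is A's `cums` built from running total `t`. -/
def psList (t : Int) : List Int → List Int
  | [] => []
  | x :: xs => (t + x) :: psList (t + x) xs

theorem psList_length (t : Int) (xs : List Int) : (psList t xs).length = xs.length := by
  induction xs generalizing t with
  | nil => rfl
  | cons x xs ih => simp [psList, ih]

theorem psList_getElem? (t : Int) (xs : List Int) (i : Nat) (hi : i < xs.length) :
    (psList t xs)[i]? = some (t + (xs.take (i + 1)).sum) := by
  induction xs generalizing t i with
  | nil => simp at hi
  | cons x xs ih =>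
    cases i with
    | zero => simp [psList]
    | succ j =>
      have := ih (t + x) j (by simpa using hi)
      simp [psList, this, add_assoc]

/-- A's first loop builds exactly `psList`. -/
theorem foldl_build_cums (xs : List Int) (acc : List Int) (t : Int) :
    xs.foldl (fun (st : List Int × Int) num =>
      let t := st.2 + num
      (st.1 ++ [t], t)) (acc, t) = (acc ++ psList t xs, t + xs.sum) := by
  induction xs generalizing acc t with
  | nil => simp [psList]
  | cons x xs ih => simp [psList, ih, add_assoc]

/-- A's second loop counted over `List.range`. -/
theorem foldl_countA (cums : List Int) (m : Nat) (r : Int) :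
    (PySem.List.pyRange 0 (m : Int) 1).foldl (fun result i =>
        if (PySem.List.pyGet? cums i).getD 0
            ≥ (PySem.List.pyGet? cums (-1)).getD 0 - (PySem.List.pyGet? cums i).getD 0
          then result + 1 else result) r
      = r + ((List.range m).countP (fun (i : Nat) =>
          decide ((PySem.List.pyGet? cums ((i : Nat) : Int)).getD 0
            ≥ (PySem.List.pyGet? cums (-1)).getD 0
              - (PySem.List.pyGet? cums ((i : Nat) : Int)).getD 0)) : Int) := by
  induction m generalizing r with
  | zero => simp [PySem.List.pyRange_one_eq_nil]
  | succ k ih =>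
    rw [show ((k + 1 : Nat) : Int) = (k : Int) + 1 by push_cast; ring,
        PySem.List.pyRange_one_succ_right (by positivity), List.foldl_append, ih]
    simp only [List.foldl_cons, List.foldl_nil, List.range_succ, List.countP_append,
      List.countP_cons, List.countP_nil]
    by_cases h : (PySem.List.pyGet? cums (-1)).getD 0 ≤ cums[k]?.getD 0 + cums[k]?.getD 0
    · simp [h]; omega
    · simp [h]

/-- Suffix-count reference: number of nonempty suffixes of `ys` whose sum `r`
    satisfies `2 * r ≤ total`. -/
def sufCnt (total : Int) : List Int → Int
  | [] => 0
  | y :: rest => (if 2 * (y + rest.sum) ≤ total then 1 else 0) + sufCnt total rest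

theorem bfold_fst (total : Int) (zs : List Int) (s c : Int) :
    (zs.foldl (fun (st : Int × Int) num =>
        let right := st.1 + num
        (right, if 2 * right ≤ total then st.2 + 1 else st.2)) (s, c)).1 = s + zs.sum := by
  induction zs generalizing s c with
  | nil => simp
  | cons z zs ih =>
    rw [List.foldl_cons]
    show (zs.foldl _ (s + z, if 2 * (s + z) ≤ total then c + 1 else c)).1 = _
    rw [ih]
    simp [add_assoc]

/-- B's pass over `ys.reverse` computes exactly `sufCnt`. -/
theorem bcount_eq (total : Int) (ys : List Int) :
    ((ys.reverse).foldl (fun (st : Int × Int) num =>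
        let right := st.1 + num
        (right, if 2 * right ≤ total then st.2 + 1 else st.2)) (0, 0)).2
      = sufCnt total ys := by
  induction ys with
  | nil => simp [sufCnt]
  | cons y ys ih =>
    rw [List.reverse_cons, List.foldl_append]
    have h1 := bfold_fst total ys.reverse 0 0
    set P := (ys.reverse).foldl (fun (st : Int × Int) num =>
        let right := st.1 + num
        (right, if 2 * right ≤ total then st.2 + 1 else st.2)) (0, 0) with hP
    rw [List.foldl_cons, List.foldl_nil]
    show (if 2 * (P.1 + y) ≤ total then P.2 + 1 else P.2) = _
    rw [sufCnt, ← ih]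
    rw [h1]
    simp only [List.sum_reverse, zero_add]
    by_cases h : 2 * (ys.sum + y) ≤ total
    · have h' : 2 * (y + ys.sum) ≤ total := by linarith
      simp [h, h']; ring
    · have h' : ¬ 2 * (y + ys.sum) ≤ total := by linarith
      simp [h, h']

/-- `sufCnt` counted positionally, to meet A's index loop. -/
theorem sufCnt_eq_countP (total : Int) (ys : List Int) :
    sufCnt total ys
      = ((List.range ys.length).countP
          (fun k => decide (2 * (ys.drop k).sum ≤ total)) : Int) := by
  induction ys with
  | nil => simp [sufCnt]
  | cons y ys ih =>
    rw [sufCnt, ih, List.length_cons, List.range_succ_eq_map, List.countP_cons,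
      List.countP_map]
    have hcc : (List.range ys.length).countP
        ((fun k => decide (2 * (((y :: ys).drop k).sum) ≤ total)) ∘ Nat.succ)
        = (List.range ys.length).countP (fun k => decide (2 * ((ys.drop k).sum) ≤ total)) :=
      List.countP_congr (fun k _ => by simp)
    rw [hcc]
    by_cases h : 2 * (y + ys.sum) ≤ total
    · have h0 : (decide (2 * (((y :: ys).drop 0).sum) ≤ total)) = true := by simp [h]
      rw [if_pos h, h0, if_pos rfl]
      push_cast
      omega
    · have h0 : (decide (2 * (((y :: ys).drop 0).sum) ≤ total)) = false := by simp [h]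
      rw [if_neg h, h0, if_neg (by simp)]
      push_cast
      omega

/-- Main pointwise proof. -/
theorem waysToSplitArray_eq (nums : List Int) :
    waysToSplitArray nums = waysToSplitArray_alt nums := by
  unfold waysToSplitArray waysToSplitArray_alt
  rw [foldl_build_cums, PySem.List.slice_from_one, bcount_eq, sufCnt_eq_countP]
  simp only [List.nil_append, List.length_tail]
  cases nums with
  | nil => simp [PySem.List.pyRange]
  | cons a l =>
    set nums := a :: l with hn
    have hpos : 1 ≤ nums.length := by simp [hn]
    have hlen : (psList 0 nums).length = nums.length := psList_length 0 nums
    have hlast : PySem.List.pyGet? (psList 0 nums) (-1) = some nums.sum := by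
      rw [PySem.List.pyGet?_neg_one, List.getLast?_eq_getElem?]
      rw [hlen, psList_getElem? 0 nums (nums.length - 1) (by omega), zero_add]
      congr 1
      have h1 : nums.length - 1 + 1 = nums.length := by omega
      rw [h1, List.take_length]
    have hcast : ((nums.length : Int) - 1) = ((nums.length - 1 : Nat) : Int) := by
      omega
    rw [hcast]
    refine (foldl_countA (psList 0 nums) (nums.length - 1) 0).trans ?_
    rw [zero_add]
    congr 1
    apply List.countP_congr
    intro i hi
    have hi' : i < nums.length - 1 := List.mem_range.mp hi
    have hg : PySem.List.pyGet? (psList 0 nums) (i : Int) = some ((nums.take (i + 1)).sum) := by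
      rw [PySem.List.pyGet?_natCast, psList_getElem? 0 nums i (by omega), zero_add]
    have hsplit : (nums.take (i + 1)).sum + (nums.drop (i + 1)).sum = nums.sum := by
      rw [← List.sum_append, List.take_append_drop]
    have hdd : nums.tail.drop i = nums.drop (i + 1) := by
      rw [← List.drop_one, List.drop_drop, Nat.add_comm]
    rw [hg, hlast]
    simp only [hdd, Option.getD_some, ge_iff_le]
    simp only [decide_eq_true_eq]
    omega

-- ===== VERDICT (by name: the statement is the Claim_ definition above) =====
theorem waysToSplitArray_spec : Claim_equal_waysToSplitArray := by
  intro nums _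
  exact waysToSplitArray_eq nums
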